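-- pv_equiv track=rewrite | github.com/SmartaskUA/SmarTaskUA | algorithm/heuristic_sol.py | identificar_equipes
-- ===== SOURCE A (Python) =====
-- def identificar_equipes(Prefs):
--     equipe_A, equipe_B, ambas = [], [], []
--     for i, pref in enumerate(Prefs):
--         if 0 in pref and 1 in pref:
--             ambas.append(i)
--         elif 0 in pref:
--             equipe_A.append(i)
--         elif 1 in pref:
--             equipe_B.append(i)
--     return equipe_A, equipe_B, ambas
-- ===== SOURCE B (Python) =====
-- def identificar_equipes(Prefs):
--     has0 = [i for i, p in enumerate(Prefs) if 0 in p]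
--     has1 = [i for i, p in enumerate(Prefs) if 1 in p]
--     s0, s1 = set(has0), set(has1)
--     equipe_A = [i for i in has0 if i not in s1]
--     equipe_B = [i for i in has1 if i not in s0]
--     ambas = [i for i in has0 if i in s1]
--     return equipe_A, equipe_B, ambas
-- ===== Notes on version B (the rewrite author's own statement) =====
-- stated objective: alternative
-- what changed: Replaces the if/elif classification cascade over three accumulators with set algebra on two membership index lists (has0/has1) built in separate scans, combining them by intersection and difference.
import Mathlib
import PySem

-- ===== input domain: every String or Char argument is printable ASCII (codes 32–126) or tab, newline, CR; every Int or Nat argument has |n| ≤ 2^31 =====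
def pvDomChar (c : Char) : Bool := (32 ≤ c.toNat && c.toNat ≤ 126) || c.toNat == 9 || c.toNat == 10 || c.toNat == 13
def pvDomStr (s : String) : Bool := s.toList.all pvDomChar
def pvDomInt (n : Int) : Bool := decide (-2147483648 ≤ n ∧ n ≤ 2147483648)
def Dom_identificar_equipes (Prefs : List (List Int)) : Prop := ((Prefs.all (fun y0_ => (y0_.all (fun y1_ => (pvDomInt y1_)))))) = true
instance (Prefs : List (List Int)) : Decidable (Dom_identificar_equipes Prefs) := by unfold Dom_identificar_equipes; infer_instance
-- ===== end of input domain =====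

-- B replaces A's if/elif classification cascade with set algebra on two membership index lists
-- (has0/has1), combining them by intersection and difference; alternative decomposition, same cost.

-- ===== PORT A =====
def identificar_equipes (Prefs : List (List Int)) : List Int × List Int × List Int :=
  (PySem.List.enumerate Prefs 0).foldl
    (fun acc ip =>
      if ip.2.contains 0 && ip.2.contains 1 then (acc.1, acc.2.1, acc.2.2 ++ [ip.1])
      else if ip.2.contains 0 then (acc.1 ++ [ip.1], acc.2.1, acc.2.2)
      else if ip.2.contains 1 then (acc.1, acc.2.1 ++ [ip.1], acc.2.2)
      else acc)
    ([], [], [])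

-- ===== PORT B =====
def identificar_equipes_alt (Prefs : List (List Int)) : List Int × List Int × List Int :=
  let has0 := ((PySem.List.enumerate Prefs 0).filter (fun ip => ip.2.contains 0)).map (·.1)
  let has1 := ((PySem.List.enumerate Prefs 0).filter (fun ip => ip.2.contains 1)).map (·.1)
  let s0 := PySem.Set.ofList has0
  let s1 := PySem.Set.ofList has1
  let equipe_A := has0.filter (fun i => !(PySem.Set.contains s1 i))
  let equipe_B := has1.filter (fun i => !(PySem.Set.contains s0 i))
  let ambas := has0.filter (fun i => PySem.Set.contains s1 i)
  (equipe_A, equipe_B, ambas)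

-- ===== PRECONDITION & SPEC =====
def Spec_identificar_equipes (Prefs : List (List Int)) (out : List Int × List Int × List Int) : Prop := out = identificar_equipes_alt Prefs
instance (Prefs : List (List Int)) (out : List Int × List Int × List Int) : Decidable (Spec_identificar_equipes Prefs out) := by unfold Spec_identificar_equipes; infer_instance

-- ===== CLAIM (what is proved, stated in full; the proofs are below) =====
def Claim_equal_identificar_equipes : Prop := ∀ (Prefs : List (List Int)), Dom_identificar_equipes Prefs → Spec_identificar_equipes Prefs (identificar_equipes Prefs)

-- ===== LEMMAS AND PROOFS =====

-- the list of indices (starting at s) of preference lists satisfying q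
def hasL (q : List Int → Bool) (xs : List (List Int)) (s : Int) : List Int :=
  ((PySem.List.enumerate xs s).filter (fun ip => q ip.2)).map (·.1)

theorem le_of_mem_hasL {q : List Int → Bool} {xs : List (List Int)} {s i : Int}
    (h : i ∈ hasL q xs s) : s ≤ i := by
  have : i ∈ (PySem.List.enumerate xs s).map (·.1) := by
    obtain ⟨ip, hip, rfl⟩ := List.mem_map.1 h
    exact List.mem_map_of_mem (List.mem_of_mem_filter hip)
  rw [PySem.List.map_fst_enumerate] at this
  exact (PySem.List.mem_pyRange_one.1 this).1

theorem hasL_cons (q : List Int → Bool) (x : List Int) (xs : List (List Int)) (s : Int) :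
    hasL q (x :: xs) s = (if q x then [s] else []) ++ hasL q xs (s + 1) := by
  simp [hasL, PySem.List.enumerate_cons]
  cases hq : q x <;> simp [hq]

theorem not_mem_hasL_succ (q : List Int → Bool) (xs : List (List Int)) (s : Int) :
    s ∉ hasL q xs (s + 1) := fun h => by have := le_of_mem_hasL h; omega

theorem contains_hasL_cons_self (q : List Int → Bool) (x : List Int) (xs : List (List Int)) (s : Int) :
    (hasL q (x :: xs) s).contains s = q x := by
  rw [hasL_cons]
  cases hq : q x <;> simp [not_mem_hasL_succ q xs s]

theorem contains_hasL_cons_ne (q : List Int → Bool) (x : List Int) (xs : List (List Int)) (s i : Int)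
    (h : i ≠ s) : (hasL q (x :: xs) s).contains i = (hasL q xs (s + 1)).contains i := by
  rw [hasL_cons]
  cases hq : q x <;> simp [h]

-- filtering the has-p indices by (non)membership among the has-q indices is a single combined filter
theorem hasL_filter_contains (p q : List Int → Bool) (b : Bool) (xs : List (List Int)) (s : Int) :
    (hasL p xs s).filter (fun i => (hasL q xs s).contains i == b)
      = hasL (fun v => p v && (q v == b)) xs s := by
  induction xs generalizing s with
  | nil => simp [hasL, PySem.List.enumerate_nil]
  | cons x xs ih =>
    rw [hasL_cons p, hasL_cons (fun v => p v && (q v == b)), List.filter_append]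
    have htail : (hasL p xs (s+1)).filter (fun i => (hasL q (x :: xs) s).contains i == b)
        = hasL (fun v => p v && (q v == b)) xs (s+1) := by
      rw [← ih]
      apply List.filter_congr
      intro i hi
      have hne : i ≠ s := by have := le_of_mem_hasL hi; omega
      rw [contains_hasL_cons_ne q x xs s i hne]
    rw [htail]
    congr 1
    have hc := contains_hasL_cons_self q x xs s
    cases hp : p x <;> cases hq : q x <;> rw [hq] at hc <;>
        simp only [List.contains_iff_mem, Bool.eq_false_iff, ne_eq] at hc <;>
      simp [List.filter_cons, hc]

theorem hasL_filter_not_contains' (p q : List Int → Bool) (xs : List (List Int)) (s : Int) :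
    (hasL p xs s).filter (fun i => !((hasL q xs s).contains i))
      = hasL (fun v => p v && !(q v)) xs s := by
  have h := hasL_filter_contains p q false xs s
  rw [show (fun i => !((hasL q xs s).contains i)) = (fun i => (hasL q xs s).contains i == false) by
        funext i; cases (hasL q xs s).contains i <;> rfl,
      h]
  have : (fun v : List Int => p v && (q v == false)) = (fun v => p v && !(q v)) := by
    funext v; cases q v <;> simp
  rw [this]

theorem hasL_filter_yes_contains' (p q : List Int → Bool) (xs : List (List Int)) (s : Int) :
    (hasL p xs s).filter (fun i => (hasL q xs s).contains i)
      = hasL (fun v => p v && q v) xs s := by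
  have h := hasL_filter_contains p q true xs s
  rw [show (fun i => ((hasL q xs s).contains i : Bool)) = (fun i => (hasL q xs s).contains i == true) by
        funext i; cases (hasL q xs s).contains i <;> rfl,
      h]
  have : (fun v : List Int => p v && (q v == true)) = (fun v => p v && q v) := by
    funext v; cases q v <;> simp
  rw [this]

-- A's accumulator loop in closed form: three combined filters
theorem foldl_shape (es : List (Int × List Int)) (a b c : List Int) :
    es.foldl
      (fun acc ip =>
        if ip.2.contains 0 && ip.2.contains 1 then (acc.1, acc.2.1, acc.2.2 ++ [ip.1])
        else if ip.2.contains 0 then (acc.1 ++ [ip.1], acc.2.1, acc.2.2)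
        else if ip.2.contains 1 then (acc.1, acc.2.1 ++ [ip.1], acc.2.2)
        else acc)
      (a, b, c)
    = (a ++ (es.filter (fun ip => ip.2.contains 0 && !(ip.2.contains 1))).map (·.1),
       b ++ (es.filter (fun ip => ip.2.contains 1 && !(ip.2.contains 0))).map (·.1),
       c ++ (es.filter (fun ip => ip.2.contains 0 && ip.2.contains 1)).map (·.1)) := by
  induction es generalizing a b c with
  | nil => simp
  | cons e es ih =>
    rw [List.foldl_cons]
    cases h0 : e.2.contains 0 <;> cases h1 : e.2.contains 1 <;>
      simp only [h0, h1, Bool.and_self, Bool.and_true, Bool.and_false,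
        Bool.not_true, Bool.not_false, Bool.false_eq_true,
        List.filter_cons, ih] <;>
      simp [List.append_assoc]

theorem pv_main (Prefs : List (List Int)) :
    identificar_equipes Prefs = identificar_equipes_alt Prefs := by
  have hset : ∀ (l : List Int) (i : Int),
      PySem.Set.contains (PySem.Set.ofList l) i = l.contains i := by
    intro l i
    simp [PySem.Set.contains, PySem.Set.mem_ofList]
  unfold identificar_equipes identificar_equipes_alt
  simp only [hset]
  rw [foldl_shape]
  have e0 : ((PySem.List.enumerate Prefs 0).filter (fun ip => ip.2.contains 0)).map (·.1)
      = hasL (fun v => v.contains 0) Prefs 0 := rfl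
  have e1 : ((PySem.List.enumerate Prefs 0).filter (fun ip => ip.2.contains 1)).map (·.1)
      = hasL (fun v => v.contains 1) Prefs 0 := rfl
  simp only [e0, e1,
    hasL_filter_not_contains' (fun v => v.contains 0) (fun v => v.contains 1) Prefs 0,
    hasL_filter_not_contains' (fun v => v.contains 1) (fun v => v.contains 0) Prefs 0,
    hasL_filter_yes_contains' (fun v => v.contains 0) (fun v => v.contains 1) Prefs 0]
  simp [hasL]

-- ===== VERDICT (by name: the statement is the Claim_ definition above) =====
theorem identificar_equipes_spec : Claim_equal_identificar_equipes := by
  intro Prefs _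
  exact pv_main Prefs
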